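-- pv_equiv track=rewrite | github.com/DanielsGil/Python | Otros/qrgenerateV2.py | calcular_relleno_binario
-- ===== SOURCE A (Python) =====
-- def calcular_relleno_binario(mensaje_terminado):
--
--     #Calcula el relleno necesario para completar un mensaje QR al tamaño especificado.
--
--     #El tamaño del mensaje debe ser de 44 bytes, esto para QR version 2
--     tamano_total = 44
--     # Calcular la longitud actual en bytes
--     longitud_actual_bits = len(mensaje_terminado)
--     longitud_actual_bytes = (longitud_actual_bits + 7) // 8  # Redondear hacia arriba
--
--     # Calcular el relleno necesario en bytes
--     relleno_necesario = tamano_total - longitud_actual_bytes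
--     if relleno_necesario <= 0:
--         return ""  # No se necesita relleno si ya está lleno
--
--     # Generar el patrón de relleno en bytes
--     patron_relleno = [0xEC, 0x11]
--     relleno_bytes = []
--     for i in range(relleno_necesario):
--         relleno_bytes.append(patron_relleno[i % 2])  # Alternar entre 0xEC y 0x11
--
--     # Convertir los bytes de relleno a binario
--     relleno_binario = ''.join(f"{byte:08b}" for byte in relleno_bytes)
--
--     return relleno_binario
-- ===== SOURCE B (Python) =====
-- def calcular_relleno_binario(mensaje_terminado):
--     # Padding needed in bytes for a 44-byte QR v2 message.
--     relleno_necesario = 44 - (len(mensaje_terminado) + 7) // 8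
--     if relleno_necesario <= 0:
--         return ""
--     # 0xEC,0x11 in 8-bit binary, as one 16-bit unit; repeat and cut to size.
--     base = "1110110000010001"
--     return (base * ((relleno_necesario + 1) // 2))[:relleno_necesario * 8]
-- ===== Notes on version B (the rewrite author's own statement) =====
-- stated objective: idiomatic
-- what changed: B replaces A's per-byte loop plus per-byte 08b formatting and join with a closed-form repeat-and-slice of the fixed 16-bit pattern string.
import Mathlib
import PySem

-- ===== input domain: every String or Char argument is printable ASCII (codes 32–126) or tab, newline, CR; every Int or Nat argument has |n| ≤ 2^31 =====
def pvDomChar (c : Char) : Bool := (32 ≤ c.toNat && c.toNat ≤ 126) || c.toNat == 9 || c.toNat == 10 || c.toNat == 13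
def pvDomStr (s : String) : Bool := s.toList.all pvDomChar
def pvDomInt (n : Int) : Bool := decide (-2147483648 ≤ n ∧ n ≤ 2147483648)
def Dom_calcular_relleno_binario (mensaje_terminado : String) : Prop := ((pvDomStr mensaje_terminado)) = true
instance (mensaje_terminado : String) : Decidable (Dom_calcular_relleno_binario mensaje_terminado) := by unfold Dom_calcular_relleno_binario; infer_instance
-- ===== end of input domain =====

-- B replaces A's per-byte loop + 08b formatting + join by repeating the fixed
-- 16-bit pattern string and slicing it to length (idiomatic; same cost).

-- ===== PORT A =====
-- f"{byte:08b}" ported by hand (exact for 0 ≤ byte < 256, the only values used here)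
def pvBin8 (b : Int) : List Char :=
  (List.range 8).map (fun j => if b.toNat >>> (7 - j) % 2 = 1 then '1' else '0')

def calcular_relleno_binario (mensaje_terminado : String) : String :=
  let tamano_total : Int := 44
  let longitud_actual_bits : Int := PySem.Str.len mensaje_terminado
  let longitud_actual_bytes : Int := PySem.Int.floordiv (longitud_actual_bits + 7) 8
  let relleno_necesario : Int := tamano_total - longitud_actual_bytes
  if relleno_necesario ≤ 0 then "" else
    let patron_relleno : List Int := [0xEC, 0x11]
    -- i % 2 ∈ {0,1} is always in range, so pyGetD's default is never used
    let relleno_bytes : List Int :=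
      (PySem.List.pyRange 0 relleno_necesario 1).foldl
        (fun acc i => acc ++ [PySem.List.pyGetD patron_relleno (PySem.Int.mod i 2) 0]) []
    String.ofList (PySem.Chars.join [] (relleno_bytes.map pvBin8))

-- ===== PORT B =====
def calcular_relleno_binario_alt (mensaje_terminado : String) : String :=
  let relleno_necesario : Int := 44 - PySem.Int.floordiv (PySem.Str.len mensaje_terminado + 7) 8
  if relleno_necesario ≤ 0 then "" else
    let base : List Char := "1110110000010001".toList
    -- base * k ported by hand as replicate/flatten (exact: here k ≥ 1)
    String.ofList (PySem.List.slice
      (List.flatten (List.replicate (PySem.Int.floordiv (relleno_necesario + 1) 2).toNat base))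
      none (some (relleno_necesario * 8)))

-- ===== PRECONDITION & SPEC =====
def Spec_calcular_relleno_binario (mensaje_terminado : String) (out : String) : Prop := out = calcular_relleno_binario_alt mensaje_terminado
instance (mensaje_terminado : String) (out : String) : Decidable (Spec_calcular_relleno_binario mensaje_terminado out) := by unfold Spec_calcular_relleno_binario; infer_instance

-- ===== CLAIM (what is proved, stated in full; the proofs are below) =====
def Claim_equal_calcular_relleno_binario : Prop := ∀ (mensaje_terminado : String), Dom_calcular_relleno_binario mensaje_terminado → Spec_calcular_relleno_binario mensaje_terminado (calcular_relleno_binario mensaje_terminado)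

-- ===== LEMMAS AND PROOFS =====

-- A's else-branch as a function of the (positive) byte count k
def pvOutA (k : Int) : List Char :=
  let patron_relleno : List Int := [0xEC, 0x11]
  let relleno_bytes : List Int :=
    (PySem.List.pyRange 0 k 1).foldl
      (fun acc i => acc ++ [PySem.List.pyGetD patron_relleno (PySem.Int.mod i 2) 0]) []
  PySem.Chars.join [] (relleno_bytes.map pvBin8)

-- B's else-branch as a function of k
def pvOutB (k : Int) : List Char :=
  PySem.List.slice
    (List.flatten (List.replicate (PySem.Int.floordiv (k + 1) 2).toNat "1110110000010001".toList))
    none (some (k * 8))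

lemma pvA_split (m : String) :
    calcular_relleno_binario m =
      (if 44 - PySem.Int.floordiv (PySem.Str.len m + 7) 8 ≤ 0 then ""
       else String.ofList (pvOutA (44 - PySem.Int.floordiv (PySem.Str.len m + 7) 8))) := rfl

lemma pvB_split (m : String) :
    calcular_relleno_binario_alt m =
      (if 44 - PySem.Int.floordiv (PySem.Str.len m + 7) 8 ≤ 0 then ""
       else String.ofList (pvOutB (44 - PySem.Int.floordiv (PySem.Str.len m + 7) 8))) := rfl

-- the two branch bodies agree for every byte count 1..44 (all that can occur)
set_option maxRecDepth 8192 in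
set_option maxHeartbeats 1000000 in
lemma pvKey : ∀ n : Nat, n < 45 → pvOutA (n : Int) = pvOutB (n : Int) := by decide

-- ===== VERDICT (by name: the statement is the Claim_ definition above) =====
theorem calcular_relleno_binario_spec : Claim_equal_calcular_relleno_binario := by
  intro m _
  unfold Spec_calcular_relleno_binario
  rw [pvA_split, pvB_split]
  have hlen : PySem.Str.len m = ((m.toList.length : Nat) : Int) := by
    simp [PySem.Str.len_eq]
  have hq : PySem.Int.floordiv (PySem.Str.len m + 7) 8
      = (((m.toList.length + 7) / 8 : Nat) : Int) := by
    rw [hlen]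
    exact_mod_cast PySem.Int.floordiv_natCast (m.toList.length + 7) 8
  set q : Nat := (m.toList.length + 7) / 8 with hqdef
  rw [hq]
  by_cases h44 : 44 ≤ q
  · rw [if_pos (by omega), if_pos (by omega)]
  · have hlt : q < 44 := by omega
    have hcast : (44 : Int) - (q : Int) = ((44 - q : Nat) : Int) := by omega
    rw [if_neg (by omega), if_neg (by omega), hcast, pvKey (44 - q) (by omega)]
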